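-- pv_equiv track=rewrite | github.com/Qrust66/Mix-Analyzer | composition_engine/primitives/voice_leading.py | smooth_voice_to_nearest
-- ===== SOURCE A (Python) =====
-- from typing import List, Dict, Any, Tuple
--
-- def smooth_voice_to_nearest(chord_pitches: List[int],
--                             prior_chord_pitches: List[int]) -> List[int]:
--     """Transpose chord_pitches by octaves so that the voicing is as close as possible
--     to prior_chord_pitches (minimizes total voice-movement).
--
--     Tries octave displacements (-2, -1, 0, +1, +2) on EACH note independently
--     and returns the configuration with smallest total motion.
--
--     Args:
--         chord_pitches: list of MIDI pitches in a chord (any order).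
--         prior_chord_pitches: list of MIDI pitches of the PREVIOUS chord.
--
--     Returns:
--         List of pitches re-octaved to minimize movement from prior chord.
--
--     Example:
--         # Prior chord: C major in root position [60, 64, 67]
--         # New chord: F major root position [65, 69, 72] — large jump
--         # Smoothed: [65, 69, 72] → maybe re-octave F to 53, A to 57: result [53, 57, 60]
--         # Now common tone (C=60) preserved, F+A move down by 5+7 = 12 (smaller than 27)
--     """
--     if not prior_chord_pitches or not chord_pitches:
--         return list(chord_pitches)
--
--     # For each note in chord_pitches, try octave shifts (-2, -1, 0, +1, +2) and pick the one closest to ANY prior pitch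
--     best = []
--     for p in chord_pitches:
--         candidates = [p + 12 * o for o in (-2, -1, 0, 1, 2)]
--         # Pick the candidate closest to the closest prior_pitch
--         best_cand = min(candidates, key=lambda c: min(abs(c - q) for q in prior_chord_pitches))
--         best.append(best_cand)
--
--     return best
-- ===== SOURCE B (Python) =====
-- from typing import List
--
--
-- def smooth_voice_to_nearest(chord_pitches: List[int],
--                             prior_chord_pitches: List[int]) -> List[int]:
--     """Same result as A, but sorts the prior chord once and finds the nearest
--     prior pitch for each candidate by binary search instead of a linear scan."""
--     if not prior_chord_pitches or not chord_pitches: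
--         return list(chord_pitches)
--
--     s = sorted(prior_chord_pitches)
--     n = len(s)
--
--     def nearest_dist(c: int) -> int:
--         # binary search: lo = first index with s[lo] >= c
--         lo, hi = 0, n
--         while lo < hi:
--             mid = (lo + hi) // 2
--             if s[mid] < c:
--                 lo = mid + 1
--             else:
--                 hi = mid
--         d = s[lo] - c if lo < n else c - s[n - 1]
--         if 0 < lo < n and c - s[lo - 1] < d:
--             d = c - s[lo - 1]
--         return d
--
--     return [min([p + 12 * o for o in (-2, -1, 0, 1, 2)], key=nearest_dist)
--             for p in chord_pitches]
-- ===== Notes on version B (the rewrite author's own statement) =====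
-- stated objective: faster
-- what changed: B sorts the prior chord once and finds each candidate's nearest prior pitch by binary search, replacing A's linear scan over all prior pitches for every candidate.
import Mathlib
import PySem

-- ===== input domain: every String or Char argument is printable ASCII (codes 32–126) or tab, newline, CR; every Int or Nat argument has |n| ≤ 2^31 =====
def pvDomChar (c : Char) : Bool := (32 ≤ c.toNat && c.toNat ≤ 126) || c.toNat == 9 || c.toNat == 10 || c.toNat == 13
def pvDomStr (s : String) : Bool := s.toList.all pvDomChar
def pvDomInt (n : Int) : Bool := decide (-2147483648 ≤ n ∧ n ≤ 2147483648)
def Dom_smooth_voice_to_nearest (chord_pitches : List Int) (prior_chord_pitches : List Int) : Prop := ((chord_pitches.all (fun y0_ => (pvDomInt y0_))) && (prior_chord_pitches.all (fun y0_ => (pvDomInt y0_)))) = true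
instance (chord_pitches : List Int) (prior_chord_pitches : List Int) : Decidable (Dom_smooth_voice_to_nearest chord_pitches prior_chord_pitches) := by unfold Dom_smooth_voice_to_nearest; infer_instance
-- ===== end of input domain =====

-- ===== PORT A =====
-- Port of A: for each chord pitch, try the five octave shifts and pick the candidate
-- whose distance to the closest prior pitch (linear scan) is smallest (first on ties).
-- Python's min(...) / min(..., key=...) → PySem.List.min?; the .getD defaults are never
-- used: the guard ensures both lists are nonempty, so min? is always `some`.
def smooth_voice_to_nearest (chord_pitches : List Int) (prior_chord_pitches : List Int) : List Int :=
  if prior_chord_pitches = [] ∨ chord_pitches = [] then chord_pitches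
  else
    chord_pitches.map (fun p =>
      let candidates := [-2, -1, 0, 1, 2].map (fun o => p + 12 * o)
      (PySem.List.min? candidates
        (fun c =>
          (PySem.List.min? (prior_chord_pitches.map (fun q => |c - q|)) (fun x => x)).getD 0)).getD p)

-- ===== PORT B =====
-- Hand-written binary search of Source B (while lo < hi): exact — lo, hi, mid are
-- nonnegative, so Nat `(lo+hi)/2` is Python's `//2`, and s[mid] is always in range
-- (mid < hi ≤ len s), so getD is Python's s[mid].
def pvBSearch (s : List Int) (c : Int) (lo hi : Nat) : Nat :=
  if lo < hi then
    let mid := (lo + hi) / 2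
    if s.getD mid 0 < c then pvBSearch s c (mid + 1) hi else pvBSearch s c lo mid
  else lo
termination_by hi - lo
decreasing_by all_goals omega

-- Source B's nearest_dist: distance from c to the nearest element of the sorted list s
def pvNearestDist (s : List Int) (c : Int) : Int :=
  let n := s.length
  let lo := pvBSearch s c 0 n
  let d := if lo < n then s.getD lo 0 - c else c - s.getD (n - 1) 0
  if 0 < lo ∧ lo < n ∧ c - s.getD (lo - 1) 0 < d then c - s.getD (lo - 1) 0 else d

def smooth_voice_to_nearest_alt (chord_pitches : List Int) (prior_chord_pitches : List Int) : List Int :=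
  if prior_chord_pitches = [] ∨ chord_pitches = [] then chord_pitches
  else
    let s := PySem.List.sorted prior_chord_pitches (fun x => x)
    chord_pitches.map (fun p =>
      (PySem.List.min? ([-2, -1, 0, 1, 2].map (fun o => p + 12 * o))
        (fun c => pvNearestDist s c)).getD p)

-- ===== PRECONDITION & SPEC =====
def Spec_smooth_voice_to_nearest (chord_pitches : List Int) (prior_chord_pitches : List Int) (out : List Int) : Prop := out = smooth_voice_to_nearest_alt chord_pitches prior_chord_pitches
instance (chord_pitches : List Int) (prior_chord_pitches : List Int) (out : List Int) : Decidable (Spec_smooth_voice_to_nearest chord_pitches prior_chord_pitches out) := by unfold Spec_smooth_voice_to_nearest; infer_instance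

-- ===== CLAIM (what is proved, stated in full; the proofs are below) =====
def Claim_equal_smooth_voice_to_nearest : Prop := ∀ (chord_pitches : List Int) (prior_chord_pitches : List Int), Dom_smooth_voice_to_nearest chord_pitches prior_chord_pitches → Spec_smooth_voice_to_nearest chord_pitches prior_chord_pitches (smooth_voice_to_nearest chord_pitches prior_chord_pitches)

-- ===== LEMMAS AND PROOFS =====

-- Loop invariant of the binary search: it returns the first index whose element is ≥ c.
lemma pvBSearch_spec (s : List Int) (c : Int) (hs : s.Pairwise (· ≤ ·)) (lo hi : Nat)
    (hlh : lo ≤ hi) (hhn : hi ≤ s.length)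
    (Hlo : ∀ j, j < lo → ∀ (hj : j < s.length), s[j] < c)
    (Hhi : ∀ j, hi ≤ j → ∀ (hj : j < s.length), c ≤ s[j]) :
    pvBSearch s c lo hi ≤ s.length ∧
    (∀ j, j < pvBSearch s c lo hi → ∀ (hj : j < s.length), s[j] < c) ∧
    (∀ j, pvBSearch s c lo hi ≤ j → ∀ (hj : j < s.length), c ≤ s[j]) := by
  rw [pvBSearch]
  have hmono : ∀ (i j : Nat) (hi' : i < s.length) (hj : j < s.length), i ≤ j → s[i] ≤ s[j] := by
    intro i j hi' hj hij
    rcases Nat.lt_or_ge i j with h | h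
    · exact (List.pairwise_iff_getElem.mp hs) i j hi' hj h
    · have : i = j := by omega
      subst this; exact le_refl _
  by_cases h : lo < hi
  · simp only [if_pos h]
    have hmid : (lo + hi) / 2 < s.length := by omega
    have hget : s.getD ((lo + hi) / 2) 0 = s[(lo + hi) / 2] := List.getD_eq_getElem s 0 hmid
    by_cases hc : s.getD ((lo + hi) / 2) 0 < c
    · simp only [if_pos hc]
      refine pvBSearch_spec s c hs ((lo + hi) / 2 + 1) hi (by omega) hhn ?_ Hhi
      intro j hj hjl
      have : s[j] ≤ s[(lo + hi) / 2] := hmono j _ hjl hmid (by omega)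
      rw [hget] at hc; omega
    · simp only [if_neg hc]
      refine pvBSearch_spec s c hs lo ((lo + hi) / 2) (by omega) (by omega) Hlo ?_
      intro j hj hjl
      have : s[(lo + hi) / 2] ≤ s[j] := hmono _ j hmid hjl (by omega)
      rw [hget] at hc; omega
  · simp only [if_neg h]
    exact ⟨by omega, Hlo, fun j hj hjl => Hhi j (by omega) hjl⟩
termination_by hi - lo
decreasing_by all_goals omega

-- pvNearestDist on a sorted list is |c - s[k]| for some k, and minimal among all |c - s[j]|.
lemma pvNearestDist_char (s : List Int) (c : Int) (hs : s.Pairwise (· ≤ ·)) (hne : s ≠ []) :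
    ∃ (k : Nat) (hk : k < s.length),
      pvNearestDist s c = |c - s[k]| ∧ ∀ (j : Nat) (hj : j < s.length), pvNearestDist s c ≤ |c - s[j]| := by
  have hlen : 0 < s.length := List.length_pos_iff.mpr hne
  obtain ⟨hr_le, hr_lt, hr_ge⟩ :=
    pvBSearch_spec s c hs 0 s.length (by omega) (le_refl _)
      (by intro j hj _; omega) (by intro j hj hjl; omega)
  set r := pvBSearch s c 0 s.length with hr
  have hmono : ∀ (i j : Nat) (hi' : i < s.length) (hj : j < s.length), i ≤ j → s[i] ≤ s[j] := by
    intro i j hi' hj hij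
    rcases Nat.lt_or_ge i j with h | h
    · exact (List.pairwise_iff_getElem.mp hs) i j hi' hj h
    · have : i = j := by omega
      subst this; exact le_refl _
  simp only [pvNearestDist, ← hr]
  split_ifs with h1 h2 h2
  · -- r < length and c - s[r-1] strictly smaller: result c - s[r-1]
    obtain ⟨hr0, hrn, hlt⟩ := h2
    have hr1 : r - 1 < s.length := by omega
    rw [List.getD_eq_getElem s 0 hr1]
    rw [List.getD_eq_getElem s 0 hr1, List.getD_eq_getElem s 0 h1] at hlt
    have hb : s[r-1] < c := hr_lt (r - 1) (by omega) hr1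
    have hg : c ≤ s[r] := hr_ge r (le_refl _) h1
    refine ⟨r - 1, hr1, by rw [abs_of_nonneg (by omega)], ?_⟩
    intro j hj
    rcases Nat.lt_or_ge j r with hjr | hjr
    · have hjc : s[j] < c := hr_lt j hjr hj
      have hle : s[j] ≤ s[r-1] := hmono j (r-1) hj hr1 (by omega)
      rw [abs_of_nonneg (by omega)]
      omega
    · have hle : s[r] ≤ s[j] := hmono r j h1 hj hjr
      rw [abs_of_nonpos (by omega)]
      omega
  · -- r < length, first candidate s[r] - c wins (or r = 0)
    rw [List.getD_eq_getElem s 0 h1]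
    rw [List.getD_eq_getElem s 0 h1] at h2
    have hg : c ≤ s[r] := hr_ge r (le_refl _) h1
    refine ⟨r, h1, by rw [abs_of_nonpos (by omega)]; ring, ?_⟩
    intro j hj
    rcases Nat.lt_or_ge j r with hjr | hjr
    · have hr0 : 0 < r := by omega
      have hr1 : r - 1 < s.length := by omega
      rw [List.getD_eq_getElem s 0 hr1] at h2
      have hle : s[r] - c ≤ c - s[r-1] := by
        by_contra hx
        exact h2 ⟨hr0, h1, by omega⟩
      have hjc : s[j] < c := hr_lt j hjr hj
      have hjle : s[j] ≤ s[r-1] := hmono j (r-1) hj hr1 (by omega)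
      rw [abs_of_nonneg (by omega)]
      omega
    · have hle : s[r] ≤ s[j] := hmono r j h1 hj hjr
      rw [abs_of_nonpos (by omega)]
      omega
  · -- r = length but the second condition claims r < length: contradictory
    exact absurd h2.2.1 h1
  · -- r = length: result c - s[length-1]
    have hrn : r = s.length := by omega
    have hl1 : s.length - 1 < s.length := by omega
    rw [List.getD_eq_getElem s 0 hl1]
    have hb : s[s.length - 1] < c := hr_lt (s.length - 1) (by omega) hl1
    refine ⟨s.length - 1, hl1, by rw [abs_of_nonneg (by omega)], ?_⟩
    intro j hj
    have hjc : s[j] < c := hr_lt j (by omega) hj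
    have hle : s[j] ≤ s[s.length - 1] := hmono j (s.length - 1) hj hl1 (by omega)
    rw [abs_of_nonneg (by omega)]
    omega

-- A's inner linear-scan minimum equals B's sorted-and-binary-searched distance.
lemma keys_agree (prior : List Int) (c : Int) (hne : prior ≠ []) :
    (PySem.List.min? (prior.map (fun q => |c - q|)) (fun x => x)).getD 0
      = pvNearestDist (PySem.List.sorted prior (fun x => x)) c := by
  set s := PySem.List.sorted prior (fun x => x) with hsdef
  have hs : s.Pairwise (· ≤ ·) := PySem.List.sorted_pairwise prior (fun x => x)
  have hsne : s ≠ [] := by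
    intro h
    exact hne (List.Perm.eq_nil ((PySem.List.sorted_perm prior (fun x => x) false).symm.trans (h ▸ List.Perm.refl _)))
  obtain ⟨k, hk, hDeq, hDmin⟩ := pvNearestDist_char s c hs hsne
  have hLne : prior.map (fun q => |c - q|) ≠ [] := by
    simpa using hne
  obtain ⟨m, hm⟩ : ∃ m, PySem.List.min? (prior.map (fun q => |c - q|)) (fun x => x) = some m := by
    rcases h : PySem.List.min? (prior.map (fun q => |c - q|)) (fun x => x) with _ | m
    · exact absurd ((PySem.List.min?_eq_none_iff _ _).mp h) hLne
    · exact ⟨m, rfl⟩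
  rw [hm]
  simp only [Option.getD_some]
  have hmem : m ∈ prior.map (fun q => |c - q|) := PySem.List.min?_mem hm
  obtain ⟨q, hq, hqm⟩ := List.mem_map.mp hmem
  have hmmin : ∀ y ∈ prior.map (fun q => |c - q|), m ≤ y := by
    intro y hy
    simpa using PySem.List.min?_isMin hm y hy
  apply le_antisymm
  · -- m ≤ D: D = |c - s[k]| and s[k] ∈ prior
    have hk_mem : s[k] ∈ prior := (PySem.List.mem_sorted prior (fun x => x) false s[k]).mp (s.getElem_mem hk)
    rw [hDeq]
    exact hmmin _ (List.mem_map.mpr ⟨s[k], hk_mem, rfl⟩)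
  · -- D ≤ m: m = |c - q| with q ∈ s
    have hq_s : q ∈ s := (PySem.List.mem_sorted prior (fun x => x) false q).mpr hq
    obtain ⟨j, hj, hjq⟩ := List.mem_iff_getElem.mp hq_s
    rw [← hqm, ← hjq]
    exact hDmin j hj

-- ===== VERDICT (by name: the statement is the Claim_ definition above) =====
theorem smooth_voice_to_nearest_spec : Claim_equal_smooth_voice_to_nearest := by
  intro chord_pitches prior_chord_pitches _
  unfold Spec_smooth_voice_to_nearest smooth_voice_to_nearest smooth_voice_to_nearest_alt
  by_cases hg : prior_chord_pitches = [] ∨ chord_pitches = []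
  · simp only [if_pos hg]
  · simp only [if_neg hg]
    have hne : prior_chord_pitches ≠ [] := fun h => hg (Or.inl h)
    apply List.map_congr_left
    intro p _
    congr 1
    apply congrArg (fun f => PySem.List.min? ([-2, -1, 0, 1, 2].map (fun o => p + 12 * o)) f)
    funext c
    exact keys_agree prior_chord_pitches c hne
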